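-- pv_equiv track=rewrite | github.com/gerlacdt/pytudes | advent_2017/day20.py | destroy
-- ===== SOURCE A (Python) =====
-- from collections import defaultdict
--
-- def destroy(particles):
--     # check collisions of particles
--     # remove collided particles
--     dups = defaultdict(set)
--     for i, p in enumerate(particles):
--         dups[(p[0], p[1], p[2])].add(i)
--
--     indexToDelete = set()
--     for k, v in dups.items():
--         l = dups[k]
--         if len(l) > 1:
--             indexToDelete.update(l)
--
--     clearedParticles = []
--     for i, p in enumerate(particles):
--         if i in indexToDelete:
--             continue
--         clearedParticles.append(p)
--     return clearedParticles
-- ===== SOURCE B (Python) =====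
-- def destroy(particles):
--     # keep a particle iff no OTHER particle equals it (a particle is exactly
--     # the (p[0], p[1], p[2]) triple A keys on), by a direct pairwise scan --
--     # no dict/grouping/delete-set is built at all
--     return [p for i, p in enumerate(particles)
--             if not any(j != i and q == p for j, q in enumerate(particles))]
-- ===== Notes on version B (the rewrite author's own statement) =====
-- stated objective: alternative
-- what changed: Replace A's three staged passes (a dict grouping index sets by position key, a pass over that dict accumulating a delete-set of indices, then an index-membership filter) by a direct pairwise scan with no auxiliary structure at all: a particle is kept iff no other particle equals it; trades A's expected-linear hashing for a quadratic but structure-free scan.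
import Mathlib
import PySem

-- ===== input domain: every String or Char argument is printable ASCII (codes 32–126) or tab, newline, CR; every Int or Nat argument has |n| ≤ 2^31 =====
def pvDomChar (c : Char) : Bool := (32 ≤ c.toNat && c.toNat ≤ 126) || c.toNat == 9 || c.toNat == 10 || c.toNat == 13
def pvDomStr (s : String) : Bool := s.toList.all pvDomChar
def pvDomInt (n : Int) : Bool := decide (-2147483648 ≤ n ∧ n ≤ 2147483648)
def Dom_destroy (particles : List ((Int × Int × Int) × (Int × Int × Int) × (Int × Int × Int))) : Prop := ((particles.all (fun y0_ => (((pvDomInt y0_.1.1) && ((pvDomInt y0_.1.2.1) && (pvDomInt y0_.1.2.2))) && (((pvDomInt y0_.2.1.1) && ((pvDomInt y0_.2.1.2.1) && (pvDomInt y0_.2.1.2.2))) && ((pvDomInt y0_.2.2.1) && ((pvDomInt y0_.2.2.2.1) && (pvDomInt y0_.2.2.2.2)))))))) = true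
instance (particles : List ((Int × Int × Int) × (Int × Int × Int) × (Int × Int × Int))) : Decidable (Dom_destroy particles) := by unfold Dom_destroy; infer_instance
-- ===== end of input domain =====

-- B replaces A's three staged passes (dict of index sets by key, a delete-set of indices
-- accumulated over the dict, an index-membership filter) by a direct pairwise scan with
-- no auxiliary structure: keep a particle iff no other particle equals it.

-- ===== PORT A =====
def destroy (particles : List ((Int × Int × Int) × (Int × Int × Int) × (Int × Int × Int))) : List ((Int × Int × Int) × (Int × Int × Int) × (Int × Int × Int)) :=
  -- dups = defaultdict(set); for i, p in enumerate(particles): dups[(p[0], p[1], p[2])].add(i)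
  let dups : PySem.Dict ((Int × Int × Int) × (Int × Int × Int) × (Int × Int × Int)) (PySem.Set Int) :=
    (PySem.List.enumerate particles 0).foldl
      (fun d ip =>
        d.modify (ip.2.1, ip.2.2.1, ip.2.2.2) PySem.Set.empty (fun s => PySem.Set.add s ip.1))
      PySem.Dict.empty
  -- indexToDelete = set(); for k, v in dups.items(): l = dups[k]; if len(l) > 1: indexToDelete.update(l)
  let indexToDelete : PySem.Set Int :=
    dups.items.foldl
      (fun s kv => if 1 < PySem.Set.len kv.2 then PySem.Set.update s kv.2 else s)
      PySem.Set.empty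
  -- clearedParticles = []; for i, p in enumerate(particles): if i in indexToDelete: continue; append p
  (PySem.List.enumerate particles 0).foldl
    (fun acc ip => if PySem.Set.contains indexToDelete ip.1 then acc else acc ++ [ip.2]) []

-- ===== PORT B =====
def destroy_alt (particles : List ((Int × Int × Int) × (Int × Int × Int) × (Int × Int × Int))) : List ((Int × Int × Int) × (Int × Int × Int) × (Int × Int × Int)) :=
  -- [p for i, p in enumerate(particles)
  --    if not any(j != i and q == p for j, q in enumerate(particles))]
  ((PySem.List.enumerate particles 0).filter
      (fun ip => !((PySem.List.enumerate particles 0).any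
          (fun jq => jq.1 != ip.1 && jq.2 == ip.2)))).map (·.2)

-- ===== PRECONDITION & SPEC =====
def Spec_destroy (particles : List ((Int × Int × Int) × (Int × Int × Int) × (Int × Int × Int))) (out : List ((Int × Int × Int) × (Int × Int × Int) × (Int × Int × Int))) : Prop := out = destroy_alt particles
instance (particles : List ((Int × Int × Int) × (Int × Int × Int) × (Int × Int × Int))) (out : List ((Int × Int × Int) × (Int × Int × Int) × (Int × Int × Int))) : Decidable (Spec_destroy particles out) := by unfold Spec_destroy; infer_instance

-- ===== CLAIM (what is proved, stated in full; the proofs are below) =====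
def Claim_equal_destroy : Prop := ∀ (particles : List ((Int × Int × Int) × (Int × Int × Int) × (Int × Int × Int))), Dom_destroy particles → Spec_destroy particles (destroy particles)

-- ===== LEMMAS AND PROOFS =====

-- the particle type, for the proof helpers below
abbrev PvP : Type := (Int × Int × Int) × (Int × Int × Int) × (Int × Int × Int)

theorem pvSkip {α : Type} (c : Int × α → Bool) (l : List (Int × α)) (a : List α) :
    l.foldl (fun acc ip => if c ip then acc else acc ++ [ip.2]) a
      = a ++ (l.filter (fun ip => !c ip)).map (·.2) := by
  induction l generalizing a with
  | nil => simp
  | cons x t ih =>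
    simp only [List.foldl_cons, List.filter_cons]
    by_cases h : c x = true
    · simp [h, ih]
    · simp [h, ih (a ++ [x.2])]

theorem pvDel {κ : Type} (l : List (κ × PySem.Set Int)) (s0 : PySem.Set Int) (j : Int) :
    j ∈ l.foldl (fun s kv => if 1 < PySem.Set.len kv.2 then PySem.Set.update s kv.2 else s) s0
      ↔ j ∈ s0 ∨ ∃ kv ∈ l, 1 < PySem.Set.len kv.2 ∧ j ∈ kv.2 := by
  induction l generalizing s0 with
  | nil => simp
  | cons x t ih =>
    simp only [List.foldl_cons]
    by_cases h : 1 < PySem.Set.len x.2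
    · rw [if_pos h, ih]
      have h' : 1 < x.2.length := by simp only [PySem.Set.len] at h; exact_mod_cast h
      simp [PySem.Set.mem_update]
      tauto
    · rw [if_neg h, ih]
      have h' : ¬ 1 < x.2.length := by simp only [PySem.Set.len] at h; exact_mod_cast h
      simp
      tauto

theorem pvGrp (es : List (Int × PvP)) (d : PySem.Dict PvP (PySem.Set Int))
    (hfresh : ∀ ip ∈ es, ∀ k, ip.1 ∉ d.getD k PySem.Set.empty)
    (hnd : (es.map (·.1)).Nodup) (k : PvP) :
    (es.foldl (fun d ip =>
        d.modify (ip.2.1, ip.2.2.1, ip.2.2.2) PySem.Set.empty (fun s => PySem.Set.add s ip.1)) d).getD k PySem.Set.empty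
      = d.getD k PySem.Set.empty ++ (es.filter (fun ip => (ip.2.1, ip.2.2.1, ip.2.2.2) == k)).map (·.1) := by
  induction es generalizing d with
  | nil => simp
  | cons x t ih =>
    have hkey : ((x.2.1, x.2.2.1, x.2.2.2) : PvP) = x.2 := rfl
    rw [List.foldl_cons, List.filter_cons]
    have hfx : x.1 ∉ d.getD x.2 PySem.Set.empty := hfresh x (by simp) x.2
    have hadd : PySem.Set.add (d.getD x.2 PySem.Set.empty) x.1
        = d.getD x.2 PySem.Set.empty ++ [x.1] := PySem.Set.add_of_not_mem hfx
    have hnd' : (t.map (·.1)).Nodup := (List.nodup_cons.mp hnd).2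
    have hx1 : x.1 ∉ t.map (·.1) := (List.nodup_cons.mp hnd).1
    have hfresh' : ∀ ip ∈ t, ∀ k',
        ip.1 ∉ (d.modify x.2 PySem.Set.empty (fun s => PySem.Set.add s x.1)).getD k' PySem.Set.empty := by
      intro ip hip k'
      rw [PySem.Dict.getD_modify]
      split_ifs with he
      · rw [hadd]
        intro hm
        rcases List.mem_append.mp hm with hm | hm
        · exact hfresh ip (by simp [hip]) x.2 hm
        · simp only [List.mem_singleton] at hm
          exact hx1 (hm ▸ List.mem_map_of_mem hip)
      · exact hfresh ip (by simp [hip]) k'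
    rw [hkey, ih _ hfresh' hnd', PySem.Dict.getD_modify, hadd]
    by_cases he : k = x.2
    · subst he
      simp [List.append_assoc]
    · rw [if_neg he]
      have : ((x.2.1, x.2.2.1, x.2.2.2) == k) = false := by
        rw [hkey]; simp [Ne.symm he]
      simp [this]

-- G c: the index list A's dict stores at key c
def pvG (xs : List PvP) (c : PvP) : List Int :=
  ((PySem.List.enumerate xs 0).filter (fun ip => ((ip.2.1, ip.2.2.1, ip.2.2.2) : PvP) == c)).map (·.1)

theorem pvNodupIdx (xs : List PvP) : ((PySem.List.enumerate xs 0).map (·.1)).Nodup := by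
  have h := PySem.List.pairwise_lt_enumerate xs (0 : Int)
  have : ((PySem.List.enumerate xs 0).map (·.1)).Pairwise (· < ·) := by
    rw [List.pairwise_map]; exact h
  exact this.imp (fun h => ne_of_lt h)

theorem pvGNodup (xs : List PvP) (c : PvP) : (pvG xs c).Nodup := by
  unfold pvG
  exact (pvNodupIdx xs).sublist (List.Sublist.map _ List.filter_sublist)

theorem pvMemG (xs : List PvP) (c : PvP) (k : Nat) (hk : k < xs.length) :
    (k : Int) ∈ pvG xs c ↔ xs[k] = c := by
  unfold pvG
  simp only [List.mem_map, List.mem_filter]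
  constructor
  · rintro ⟨ip, ⟨hmem, hbeq⟩, hfst⟩
    rcases (PySem.List.mem_enumerate_iff _ _ _).mp hmem with ⟨m, hm, rfl⟩
    simp only [zero_add] at hbeq hfst ⊢
    have : m = k := by exact_mod_cast hfst
    subst this
    have : xs[m] = c := by simpa using hbeq
    exact this
  · intro h
    refine ⟨((k : Int), xs[k]), ⟨?_, by simpa using h⟩, rfl⟩
    exact (PySem.List.mem_enumerate_iff _ _ _).mpr ⟨k, hk, by simp⟩

theorem pvGMem' (xs : List PvP) (c : PvP) (j : Int) (hj : j ∈ pvG xs c) :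
    ∃ (k : Nat) (hk : k < xs.length), j = (k : Int) ∧ xs[k] = c := by
  unfold pvG at hj
  simp only [List.mem_map, List.mem_filter] at hj
  rcases hj with ⟨ip, ⟨hmem, hbeq⟩, hfst⟩
  rcases (PySem.List.mem_enumerate_iff _ _ _).mp hmem with ⟨m, hm, rfl⟩
  refine ⟨m, hm, by simpa using hfst.symm, by simpa using hbeq⟩

theorem pvLenG (xs : List PvP) (c : PvP) : (pvG xs c).length = xs.count c := by
  unfold pvG
  rw [List.length_map, ← List.countP_eq_length_filter]
  have : xs.count c = List.countP (fun p => p == c) ((PySem.List.enumerate xs 0).map (·.2)) := by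
    rw [PySem.List.map_snd_enumerate, List.count]
  rw [this, List.countP_map]
  rfl

theorem pvTwo {α : Type} {l : List α} {a b : α} (ha : a ∈ l) (hb : b ∈ l) (hne : a ≠ b) :
    1 < l.length := by
  rcases l with _ | ⟨x, _ | ⟨y, t⟩⟩
  · simp at ha
  · simp only [List.mem_singleton] at ha hb
    exact absurd (ha.trans hb.symm) hne
  · simp only [List.length_cons]; omega

-- 'some other index holds the same particle' ↔ 'the particle occurs more than once'
theorem pvCountIff (xs : List PvP) (m : Nat) (hm : m < xs.length) :
    (∃ (j : Nat) (hj : j < xs.length), j ≠ m ∧ xs[j] = xs[m]) ↔ 1 < xs.count xs[m] := by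
  constructor
  · rintro ⟨j, hj, hne, heq⟩
    have h1 : (j : Int) ∈ pvG xs xs[m] := (pvMemG xs _ j hj).mpr heq
    have h2 : (m : Int) ∈ pvG xs xs[m] := (pvMemG xs _ m hm).mpr rfl
    have := pvTwo h1 h2 (by exact_mod_cast hne)
    rwa [pvLenG] at this
  · intro h
    have hlen : 1 < (pvG xs xs[m]).length := by rwa [pvLenG]
    have h2 : (m : Int) ∈ pvG xs xs[m] := (pvMemG xs _ m hm).mpr rfl
    by_contra hno
    push Not at hno
    -- every element of pvG equals (m : Int)
    have hall : ∀ b ∈ pvG xs xs[m], b = (m : Int) := by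
      intro b hb
      rcases pvGMem' xs _ b hb with ⟨k, hk, rfl, hkeq⟩
      by_contra hbm
      exact absurd hkeq (hno k hk (fun hkm => hbm (by exact_mod_cast hkm)))
    have hc1 : (pvG xs xs[m]).count (m : Int) = (pvG xs xs[m]).length :=
      List.count_eq_length.mpr (fun b hb => ((hall b hb).symm : (m : Int) = b))
    have := List.nodup_iff_count_le_one.mp (pvGNodup xs xs[m]) (m : Int)
    omega

theorem destroy_eq (xs : List PvP) : destroy xs = destroy_alt xs := by
  unfold destroy destroy_alt
  set dups : PySem.Dict PvP (PySem.Set Int) :=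
    (PySem.List.enumerate xs 0).foldl
      (fun d ip =>
        d.modify (ip.2.1, ip.2.2.1, ip.2.2.2) PySem.Set.empty (fun s => PySem.Set.add s ip.1))
      PySem.Dict.empty with hdups
  set del : PySem.Set Int :=
    dups.items.foldl
      (fun s kv => if 1 < PySem.Set.len kv.2 then PySem.Set.update s kv.2 else s)
      PySem.Set.empty with hdel
  -- A's stored sets are pvG
  have hG : ∀ c, dups.getD c PySem.Set.empty = pvG xs c := by
    intro c
    rw [hdups, pvGrp _ _ (by intro ip _ k h; simp [PySem.Dict.getD_empty] at h)
      (pvNodupIdx xs) c]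
    simp [pvG, PySem.Dict.getD_empty]
  have hnk : dups.keys.Nodup := by
    rw [hdups]
    exact PySem.Dict.nodup_keys_foldl_modify_key _ _ _ _ _ (by simp)
  have hkeys : ∀ c, c ∈ dups.keys ↔ c ∈ xs := by
    intro c
    rw [hdups, PySem.Dict.keys_foldl_modify_key]
    have : ((PySem.List.enumerate xs 0).map (fun ip => ((ip.2.1, ip.2.2.1, ip.2.2.2) : PvP)))
        = xs := PySem.List.map_snd_enumerate xs 0
    simp [PySem.Set.mem_update, this]
  -- membership in the delete set, for an in-range index
  have hmemdel : ∀ (k : Nat) (hk : k < xs.length), ((k : Int) ∈ del ↔ 1 < xs.count xs[k]) := by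
    intro k hk
    rw [hdel, pvDel]
    simp only [PySem.Dict.items_eq_map_keys dups hnk PySem.Set.empty, List.mem_map]
    constructor
    · rintro (h | ⟨kv, ⟨c, hc, rfl⟩, hlen, hmem⟩)
      · simp at h
      · rw [hG c] at hlen hmem
        have hxc : xs[k] = c := (pvMemG xs c k hk).mp hmem
        have : 1 < (pvG xs c).length := by
          simp only [PySem.Set.len] at hlen; exact_mod_cast hlen
        rw [pvLenG, ← hxc] at this
        exact this
    · intro h
      refine Or.inr ⟨(xs[k], dups.getD xs[k] PySem.Set.empty), ⟨xs[k], ?_, rfl⟩, ?_, ?_⟩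
      · exact (hkeys _).mpr (xs.getElem_mem hk)
      · rw [hG, PySem.Set.len]
        have : 1 < (pvG xs xs[k]).length := by rw [pvLenG]; exact h
        exact_mod_cast this
      · rw [hG]
        exact (pvMemG xs xs[k] k hk).mpr rfl
  -- A's output is a filter over enumerate; so is B's: compare the two predicates pointwise
  rw [pvSkip, List.nil_append]
  refine congrArg (List.map (fun ip : Int × PvP => ip.2)) (List.filter_congr ?_)
  intro ip hip
  rcases (PySem.List.mem_enumerate_iff _ _ _).mp hip with ⟨m, hm, rfl⟩
  simp only [zero_add]
  -- left side: index-membership in the delete set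
  have hcontains : PySem.Set.contains del (m : Int) = decide (1 < xs.count xs[m]) := by
    by_cases h1 : 1 < xs.count xs[m]
    · rw [decide_eq_true h1]
      exact (PySem.Set.contains_iff del _).mpr ((hmemdel m hm).mpr h1)
    · rw [decide_eq_false h1, ← Bool.not_eq_true]
      intro hc
      exact h1 ((hmemdel m hm).mp ((PySem.Set.contains_iff del _).mp hc))
  -- right side: the pairwise any-scan
  have hany : ((PySem.List.enumerate xs 0).any
      (fun jq => jq.1 != (m : Int) && jq.2 == xs[m])) = decide (1 < xs.count xs[m]) := by
    by_cases h1 : 1 < xs.count xs[m]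
    · rw [decide_eq_true h1]
      rcases (pvCountIff xs m hm).mpr h1 with ⟨j, hj, hne, heq⟩
      refine List.any_eq_true.mpr ⟨((j : Int), xs[j]), ?_, ?_⟩
      · exact (PySem.List.mem_enumerate_iff _ _ _).mpr ⟨j, hj, by simp⟩
      · simp only [Bool.and_eq_true, bne_iff_ne, beq_iff_eq]
        exact ⟨by exact_mod_cast hne, heq⟩
    · rw [decide_eq_false h1]
      rw [← Bool.not_eq_true]
      intro hc
      rcases List.any_eq_true.mp hc with ⟨jq, hjq, hpred⟩
      rcases (PySem.List.mem_enumerate_iff _ _ _).mp hjq with ⟨j, hj, rfl⟩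
      simp only [zero_add, Bool.and_eq_true, bne_iff_ne, beq_iff_eq] at hpred
      exact h1 ((pvCountIff xs m hm).mp ⟨j, hj, by exact_mod_cast hpred.1, hpred.2⟩)
  rw [hcontains, hany]

-- ===== VERDICT (by name: the statement is the Claim_ definition above) =====
theorem destroy_spec : Claim_equal_destroy := by
  intro particles _
  exact destroy_eq particles
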